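-- pv_equiv track=rewrite | github.com/CoffeeWithFiree/theEngineOfProceduralGenerationOfVirtualWorlds | SearchingIslandGeometricCenterAndBorders.py | SearcIslGeomCentAndBords
-- ===== SOURCE A (Python) =====
-- def SearcIslGeomCentAndBords(number_of_land, matrix_cond):
--     """search for the geometric central cell of the island and borders"""
--     sides_x = [len(matrix_cond), 0]  # min and max
--     sides_y = [len(matrix_cond[0]), 0]  # min and max
--
--     for x in range(len(matrix_cond)):
--         for y in range(len(matrix_cond[x])):
--             if matrix_cond[x][y] == number_of_land:
--                 if x < sides_x[0]:
--                     sides_x[0] = x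
--                 if x > sides_x[1]:
--                     sides_x[1] = x
--
--                 if y < sides_y[0]:
--                     sides_y[0] = y
--                 if y > sides_y[1]:
--                     sides_y[1] = y
--
--     centr = [int(sum(sides_x) / 2), int(sum(sides_y) / 2)]
--     return centr, sides_x, sides_y
-- ===== SOURCE B (Python) =====
-- def SearcIslGeomCentAndBords(number_of_land, matrix_cond):
--     """search for the geometric central cell of the island and borders"""
--     xs = [x for x, row in enumerate(matrix_cond)
--           for y, cell in enumerate(row) if cell == number_of_land]
--     ys = [y for x, row in enumerate(matrix_cond)
--           for y, cell in enumerate(row) if cell == number_of_land]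
--     sides_x = [min([len(matrix_cond)] + xs), max([0] + xs)]
--     sides_y = [min([len(matrix_cond[0])] + ys), max([0] + ys)]
--     centr = [int(sum(sides_x) / 2), int(sum(sides_y) / 2)]
--     return centr, sides_x, sides_y
-- ===== Notes on version B (the rewrite author's own statement) =====
-- stated objective: simpler
-- what changed: Replaces A's nested index loops with mutable min/max state by two comprehensions collecting the matching row/column indices followed by plain min/max folds over them (the original sentinels len(matrix) / len(matrix[0]) / 0 stay as the seed values).
import Mathlib
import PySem

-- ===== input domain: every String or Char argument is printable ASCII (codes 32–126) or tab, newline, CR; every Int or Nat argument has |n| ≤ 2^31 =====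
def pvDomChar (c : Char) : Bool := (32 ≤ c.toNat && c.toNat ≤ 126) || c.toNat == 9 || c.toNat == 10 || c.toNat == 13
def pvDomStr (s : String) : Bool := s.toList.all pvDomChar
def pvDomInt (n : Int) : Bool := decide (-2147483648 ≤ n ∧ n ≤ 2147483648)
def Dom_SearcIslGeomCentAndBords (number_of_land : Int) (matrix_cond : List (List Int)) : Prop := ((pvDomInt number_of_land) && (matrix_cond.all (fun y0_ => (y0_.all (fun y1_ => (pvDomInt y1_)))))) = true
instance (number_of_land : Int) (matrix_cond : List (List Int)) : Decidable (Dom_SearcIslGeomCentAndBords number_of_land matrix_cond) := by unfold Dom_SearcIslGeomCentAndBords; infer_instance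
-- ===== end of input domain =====

-- B replaces A's nested index loops with two index-comprehensions plus min/max folds (simpler decomposition);
-- equivalence proved on Pre_ (nonempty matrix: Python A raises IndexError on [] at matrix_cond[0], as does B).


-- ===== PORT A =====
-- state (s.1, s.2.1, s.2.2.1, s.2.2.2) = (sides_x[0], sides_x[1], sides_y[0], sides_y[1]);
-- matrix_cond[0] is headD [] (exact under Pre_: matrix_cond ≠ []); int(sum/2) is floordiv (exact: both sums are ≥ 0)
def SearcIslGeomCentAndBords (number_of_land : Int) (matrix_cond : List (List Int)) : List Int × List Int × List Int :=
  let s := (PySem.List.pyRange 0 (PySem.List.len matrix_cond) 1).foldl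
    (fun (s : Int × Int × Int × Int) x =>
      (PySem.List.pyRange 0 (PySem.List.len (PySem.List.pyGetD matrix_cond x [])) 1).foldl
        (fun (s : Int × Int × Int × Int) y =>
          if PySem.List.pyGetD (PySem.List.pyGetD matrix_cond x []) y 0 = number_of_land then
            ((if x < s.1 then x else s.1),
             (if x > s.2.1 then x else s.2.1),
             (if y < s.2.2.1 then y else s.2.2.1),
             (if y > s.2.2.2 then y else s.2.2.2))
          else s) s)
    ((PySem.List.len matrix_cond), 0, (PySem.List.len (matrix_cond.headD [])), 0)
  ([PySem.Int.floordiv (s.1 + s.2.1) 2, PySem.Int.floordiv (s.2.2.1 + s.2.2.2) 2],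
   [s.1, s.2.1], [s.2.2.1, s.2.2.2])

-- ===== PORT B =====
-- xs/ys: the comprehensions; min([seed]+l) / max([0]+l) is l.foldl min/max seed
def SearcIslGeomCentAndBords_alt (number_of_land : Int) (matrix_cond : List (List Int)) : List Int × List Int × List Int :=
  let xs := (PySem.List.enumerate matrix_cond 0).flatMap (fun p =>
    (PySem.List.enumerate p.2 0).filterMap (fun q => if q.2 = number_of_land then some p.1 else none))
  let ys := (PySem.List.enumerate matrix_cond 0).flatMap (fun p =>
    (PySem.List.enumerate p.2 0).filterMap (fun q => if q.2 = number_of_land then some q.1 else none))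
  let sx0 := xs.foldl min (PySem.List.len matrix_cond)
  let sx1 := xs.foldl max 0
  let sy0 := ys.foldl min (PySem.List.len (matrix_cond.headD []))
  let sy1 := ys.foldl max 0
  ([PySem.Int.floordiv (sx0 + sx1) 2, PySem.Int.floordiv (sy0 + sy1) 2], [sx0, sx1], [sy0, sy1])

-- ===== PRECONDITION & SPEC =====
-- Python A raises IndexError on an empty matrix (matrix_cond[0]); everything else returns.
def Pre_SearcIslGeomCentAndBords (number_of_land : Int) (matrix_cond : List (List Int)) : Prop := matrix_cond ≠ []
instance (number_of_land : Int) (matrix_cond : List (List Int)) : Decidable (Pre_SearcIslGeomCentAndBords number_of_land matrix_cond) := by unfold Pre_SearcIslGeomCentAndBords; infer_instance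
def pvWitness_SearcIslGeomCentAndBords : Int × List (List Int) := (1, [[1, 0], [0, 1]])

def Spec_SearcIslGeomCentAndBords (number_of_land : Int) (matrix_cond : List (List Int)) (out : List Int × List Int × List Int) : Prop := out = SearcIslGeomCentAndBords_alt number_of_land matrix_cond
instance (number_of_land : Int) (matrix_cond : List (List Int)) (out : List Int × List Int × List Int) : Decidable (Spec_SearcIslGeomCentAndBords number_of_land matrix_cond out) := by unfold Spec_SearcIslGeomCentAndBords; infer_instance

-- ===== CLAIM (what is proved, stated in full; the proofs are below) =====
def Claim_equal_SearcIslGeomCentAndBords : Prop := ∀ (number_of_land : Int) (matrix_cond : List (List Int)), Dom_SearcIslGeomCentAndBords number_of_land matrix_cond → Pre_SearcIslGeomCentAndBords number_of_land matrix_cond → Spec_SearcIslGeomCentAndBords number_of_land matrix_cond (SearcIslGeomCentAndBords number_of_land matrix_cond)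

-- ===== LEMMAS AND PROOFS =====

-- matching column indices of one row, enumerated from k
def pvJs (n k : Int) (row : List Int) : List Int :=
  (PySem.List.enumerate row k).filterMap (fun q => if q.2 = n then some q.1 else none)

-- all matching row indices / column indices of the matrix, rows enumerated from k
def pvXs (n k : Int) (m : List (List Int)) : List Int :=
  (PySem.List.enumerate m k).flatMap (fun p =>
    (PySem.List.enumerate p.2 0).filterMap (fun q => if q.2 = n then some p.1 else none))
def pvYs (n k : Int) (m : List (List Int)) : List Int :=
  (PySem.List.enumerate m k).flatMap (fun p =>
    (PySem.List.enumerate p.2 0).filterMap (fun q => if q.2 = n then some q.1 else none))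

lemma pvJs_cons (n k v : Int) (rest : List Int) :
    pvJs n k (v :: rest) = if v = n then k :: pvJs n (k + 1) rest else pvJs n (k + 1) rest := by
  by_cases h : v = n <;> simp [pvJs, PySem.List.enumerate_cons, h]

lemma pv_filterMap_const (n x : Int) (row : List Int) (k : Int) :
    (PySem.List.enumerate row k).filterMap (fun q => if q.2 = n then some x else none)
      = (pvJs n k row).map (fun _ => x) := by
  induction row generalizing k with
  | nil => simp [pvJs, PySem.List.enumerate_nil]
  | cons v rest ih =>
    rw [PySem.List.enumerate_cons, pvJs_cons]
    by_cases h : v = n <;> simp [h, ih]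

-- the inner loop over one row, characterised by componentwise folds over pvJs
lemma pv_inner (n x : Int) (row : List Int) (k s0 s1 s2 s3 : Int) :
    (PySem.List.enumerate row k).foldl
      (fun (s : Int × Int × Int × Int) q =>
        if q.2 = n then
          ((if x < s.1 then x else s.1),
           (if x > s.2.1 then x else s.2.1),
           (if q.1 < s.2.2.1 then q.1 else s.2.2.1),
           (if q.1 > s.2.2.2 then q.1 else s.2.2.2))
        else s) (s0, s1, s2, s3)
    = ((pvJs n k row).foldl (fun a _ => min a x) s0,
       (pvJs n k row).foldl (fun b _ => max b x) s1,
       (pvJs n k row).foldl min s2,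
       (pvJs n k row).foldl max s3) := by
  induction row generalizing k s0 s1 s2 s3 with
  | nil => simp [pvJs, PySem.List.enumerate_nil]
  | cons v rest ih =>
    rw [PySem.List.enumerate_cons, pvJs_cons]
    by_cases h : v = n
    · have e0 : (if x < s0 then x else s0) = min s0 x := by rw [min_def]; split_ifs <;> omega
      have e1 : (if x > s1 then x else s1) = max s1 x := by rw [max_def]; split_ifs <;> omega
      have e2 : (if k < s2 then k else s2) = min s2 k := by rw [min_def]; split_ifs <;> omega
      have e3 : (if k > s3 then k else s3) = max s3 k := by rw [max_def]; split_ifs <;> omega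
      simp [List.foldl_cons, h, ih, e0, e1, e2, e3]
    · simp [List.foldl_cons, h, ih]

-- the outer loop, characterised by min/max folds over pvXs/pvYs
lemma pv_outer (n : Int) (m : List (List Int)) (k s0 s1 s2 s3 : Int) :
    (PySem.List.enumerate m k).foldl
      (fun (s : Int × Int × Int × Int) p =>
        (PySem.List.enumerate p.2 0).foldl
          (fun (s : Int × Int × Int × Int) q =>
            if q.2 = n then
              ((if p.1 < s.1 then p.1 else s.1),
               (if p.1 > s.2.1 then p.1 else s.2.1),
               (if q.1 < s.2.2.1 then q.1 else s.2.2.1),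
               (if q.1 > s.2.2.2 then q.1 else s.2.2.2))
            else s) s) (s0, s1, s2, s3)
    = ((pvXs n k m).foldl min s0, (pvXs n k m).foldl max s1,
       (pvYs n k m).foldl min s2, (pvYs n k m).foldl max s3) := by
  induction m generalizing k s0 s1 s2 s3 with
  | nil => simp [pvXs, pvYs, PySem.List.enumerate_nil]
  | cons row rest ih =>
    rw [PySem.List.enumerate_cons]
    simp only [List.foldl_cons, pv_inner, ih]
    simp only [pvXs, pvYs, PySem.List.enumerate_cons, List.flatMap_cons,
      pv_filterMap_const, List.foldl_append, List.foldl_map]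
    rfl

-- ===== VERDICT (by name: the statement is the Claim_ definition above) =====
theorem SearcIslGeomCentAndBords_spec : Claim_equal_SearcIslGeomCentAndBords := by
  intro n m _ _
  show SearcIslGeomCentAndBords n m = SearcIslGeomCentAndBords_alt n m
  have key :
      List.foldl
        (fun (s : Int × Int × Int × Int) x =>
          List.foldl
            (fun (s : Int × Int × Int × Int) y =>
              if PySem.List.pyGetD (PySem.List.pyGetD m x []) y 0 = n then
                (if x < s.1 then x else s.1, if x > s.2.1 then x else s.2.1,
                 if y < s.2.2.1 then y else s.2.2.1, if y > s.2.2.2 then y else s.2.2.2)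
              else s)
            s (PySem.List.pyRange 0 (PySem.List.len (PySem.List.pyGetD m x []))))
        (PySem.List.len m, 0, PySem.List.len (m.headD []), 0) (PySem.List.pyRange 0 (PySem.List.len m)) =
      ((pvXs n 0 m).foldl min (PySem.List.len m), (pvXs n 0 m).foldl max 0,
       (pvYs n 0 m).foldl min (PySem.List.len (m.headD [])), (pvYs n 0 m).foldl max 0) := by
    calc
      _ = List.foldl
            (fun (s : Int × Int × Int × Int) (p : Int × List Int) =>
              List.foldl
                (fun (s : Int × Int × Int × Int) y =>
                  if PySem.List.pyGetD p.2 y 0 = n then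
                    (if p.1 < s.1 then p.1 else s.1, if p.1 > s.2.1 then p.1 else s.2.1,
                     if y < s.2.2.1 then y else s.2.2.1, if y > s.2.2.2 then y else s.2.2.2)
                  else s)
                s (PySem.List.pyRange 0 (PySem.List.len p.2)))
            (PySem.List.len m, 0, PySem.List.len (m.headD []), 0) (PySem.List.enumerate m 0) := by
              rw [PySem.List.enumerate_eq_map_pyRange m ([] : List Int), List.foldl_map]
      _ = List.foldl
            (fun (s : Int × Int × Int × Int) (p : Int × List Int) =>
              List.foldl
                (fun (s : Int × Int × Int × Int) (q : Int × Int) =>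
                  if q.2 = n then
                    (if p.1 < s.1 then p.1 else s.1, if p.1 > s.2.1 then p.1 else s.2.1,
                     if q.1 < s.2.2.1 then q.1 else s.2.2.1, if q.1 > s.2.2.2 then q.1 else s.2.2.2)
                  else s)
                s (PySem.List.enumerate p.2 0))
            (PySem.List.len m, 0, PySem.List.len (m.headD []), 0) (PySem.List.enumerate m 0) := by
              have hb : ∀ (p : Int × List Int) (s : Int × Int × Int × Int),
                  List.foldl
                    (fun (s : Int × Int × Int × Int) y =>
                      if PySem.List.pyGetD p.2 y 0 = n then
                        (if p.1 < s.1 then p.1 else s.1, if p.1 > s.2.1 then p.1 else s.2.1,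
                         if y < s.2.2.1 then y else s.2.2.1, if y > s.2.2.2 then y else s.2.2.2)
                      else s)
                    s (PySem.List.pyRange 0 (PySem.List.len p.2)) =
                  List.foldl
                    (fun (s : Int × Int × Int × Int) (q : Int × Int) =>
                      if q.2 = n then
                        (if p.1 < s.1 then p.1 else s.1, if p.1 > s.2.1 then p.1 else s.2.1,
                         if q.1 < s.2.2.1 then q.1 else s.2.2.1, if q.1 > s.2.2.2 then q.1 else s.2.2.2)
                      else s)
                    s (PySem.List.enumerate p.2 0) := by
                intro p s
                rw [PySem.List.enumerate_eq_map_pyRange p.2 (0 : Int), List.foldl_map]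
              have hf := funext fun s => funext fun p => hb p s
              rw [show (fun (s : Int × Int × Int × Int) (p : Int × List Int) =>
                    List.foldl
                      (fun (s : Int × Int × Int × Int) y =>
                        if PySem.List.pyGetD p.2 y 0 = n then
                          (if p.1 < s.1 then p.1 else s.1, if p.1 > s.2.1 then p.1 else s.2.1,
                           if y < s.2.2.1 then y else s.2.2.1, if y > s.2.2.2 then y else s.2.2.2)
                        else s)
                      s (PySem.List.pyRange 0 (PySem.List.len p.2))) = _ from hf]
      _ = _ := pv_outer n m 0 _ _ _ _
  simp only [SearcIslGeomCentAndBords, SearcIslGeomCentAndBords_alt]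
  rw [key]
  simp [pvXs, pvYs]
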